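-- pv_equiv track=rewrite | github.com/ThreeFish-AI/negentropy | apps/negentropy/src/negentropy/knowledge/content.py | optimize_markdown_content
-- ===== SOURCE A (Python) =====
-- def optimize_markdown_content(markdown: str) -> str:
--     """对 Markdown 内容做轻量优化，提升可读性与稳定性。"""
--     # 统一换行符并裁剪每行右侧空白
--     normalized = markdown.replace("\r\n", "\n").replace("\r", "\n")
--     lines = [line.rstrip() for line in normalized.split("\n")]
--
--     # 压缩多余空行，最多保留一个空白行（段间留白）
--     compact_lines: list[str] = []
--     blank_count = 0
--     for line in lines:
--         if not line.strip():
--             blank_count += 1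
--             if blank_count <= 1:
--                 compact_lines.append("")
--             continue
--         blank_count = 0
--         compact_lines.append(line)
--
--     return "\n".join(compact_lines).strip()
-- ===== SOURCE B (Python) =====
-- def optimize_markdown_content(markdown: str) -> str:
--     """对 Markdown 内容做轻量优化，提升可读性与稳定性。"""
--     normalized = markdown.replace("\r\n", "\n").replace("\r", "\n")
--     lines = [line.rstrip() for line in normalized.split("\n")]
--
--     # Collapse each run of blank lines to a single "" by skipping the run,
--     # instead of maintaining a running blank counter.
--     out: list[str] = []
--     i, n = 0, len(lines)
--     while i < n:
--         if lines[i]: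
--             out.append(lines[i])
--             i += 1
--         else:
--             out.append("")
--             while i < n and not lines[i]:
--                 i += 1
--
--     return "\n".join(out).strip()
-- ===== Notes on version B (the rewrite author's own statement) =====
-- stated objective: alternative
-- what changed: Replaced the running blank-line counter with run-skipping: each run of blank lines is consumed at once and emits a single empty line, so no counter state is threaded through the loop.
import Mathlib
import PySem

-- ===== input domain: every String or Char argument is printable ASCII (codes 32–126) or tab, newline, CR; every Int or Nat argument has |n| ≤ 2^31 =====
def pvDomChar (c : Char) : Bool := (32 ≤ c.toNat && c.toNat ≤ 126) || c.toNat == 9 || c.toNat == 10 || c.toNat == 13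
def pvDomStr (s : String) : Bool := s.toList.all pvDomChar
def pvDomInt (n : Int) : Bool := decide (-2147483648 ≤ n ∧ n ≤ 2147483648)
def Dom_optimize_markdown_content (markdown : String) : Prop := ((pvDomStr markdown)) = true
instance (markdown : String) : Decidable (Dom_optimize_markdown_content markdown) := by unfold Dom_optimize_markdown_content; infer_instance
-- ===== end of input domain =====

-- B collapses blank-line runs by skipping each run and emitting one "", instead of A's running
-- blank counter; same cost, different loop decomposition ("alternative").

-- ===== PORT A =====
-- A's blank-compression loop: state = (accumulated lines, blank_count)
def aLoop : List (List Char) → List (List Char) → Nat → List (List Char)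
  | [], acc, _ => acc
  | l :: rest, acc, blank =>
    if PySem.Chars.strip l = [] then
      aLoop rest (if blank + 1 ≤ 1 then acc ++ [[]] else acc) (blank + 1)
    else
      aLoop rest (acc ++ [l]) 0

def optimize_markdown_content (markdown : String) : String :=
  let normalized := PySem.Str.replace (PySem.Str.replace markdown "\r\n" "\n") "\r" "\n"
  let lines := (PySem.Chars.splitOn normalized.toList ['\n']).map PySem.Chars.rstrip
  let compact := aLoop lines [] 0
  PySem.Str.strip (String.ofList (PySem.Chars.join ['\n'] compact))

-- ===== PORT B =====
-- the inner `while i < n and not lines[i]` of Source B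
def skipBlanks : List (List Char) → List (List Char)
  | [] => []
  | l :: rest => if l = [] then skipBlanks rest else l :: rest

theorem skipBlanks_length_le : ∀ xs : List (List Char), (skipBlanks xs).length ≤ xs.length
  | [] => le_refl _
  | l :: rest => by
    simp only [skipBlanks]
    split
    · exact le_trans (skipBlanks_length_le rest) (Nat.le_succ _)
    · exact le_refl _

-- the outer while-loop of Source B: emit a non-blank line, or one "" per blank run
def bLoop : List (List Char) → List (List Char)
  | [] => []
  | l :: rest =>
    if l = [] then [] :: bLoop (skipBlanks rest)
    else l :: bLoop rest
termination_by xs => xs.length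
decreasing_by
  · exact Nat.lt_succ_of_le (skipBlanks_length_le rest)
  · simp

def optimize_markdown_content_alt (markdown : String) : String :=
  let normalized := PySem.Str.replace (PySem.Str.replace markdown "\r\n" "\n") "\r" "\n"
  let lines := (PySem.Chars.splitOn normalized.toList ['\n']).map PySem.Chars.rstrip
  let out := bLoop lines
  PySem.Str.strip (String.ofList (PySem.Chars.join ['\n'] out))

-- ===== PRECONDITION & SPEC =====
def Spec_optimize_markdown_content (markdown : String) (out : String) : Prop := out = optimize_markdown_content_alt markdown
instance (markdown : String) (out : String) : Decidable (Spec_optimize_markdown_content markdown out) := by unfold Spec_optimize_markdown_content; infer_instance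

-- ===== CLAIM (what is proved, stated in full; the proofs are below) =====
def Claim_equal_optimize_markdown_content : Prop := ∀ (markdown : String), Dom_optimize_markdown_content markdown → Spec_optimize_markdown_content markdown (optimize_markdown_content markdown)

-- ===== LEMMAS AND PROOFS =====

-- an rstripped line strips to [] iff it is already []
theorem rstrip_all_isspace_iff (s : List Char) :
    PySem.Chars.rstrip s = [] ↔ s.all PySem.Chars.isspace := by
  simp [PySem.Chars.rstrip, List.dropWhile_eq_nil_iff, List.all_eq_true]

theorem strip_rstrip_eq_nil_iff (s : List Char) :
    PySem.Chars.strip (PySem.Chars.rstrip s) = [] ↔ PySem.Chars.rstrip s = [] := by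
  constructor
  · intro h
    simp only [PySem.Chars.strip] at h
    have h1 := (rstrip_all_isspace_iff _).mp h
    simp only [PySem.Chars.lstrip, List.all_eq_true] at h1
    have hall : ∀ x ∈ PySem.Chars.rstrip s, PySem.Chars.isspace x := by
      intro x hx
      rw [← List.takeWhile_append_dropWhile (p := PySem.Chars.isspace)
            (l := PySem.Chars.rstrip s)] at hx
      rcases List.mem_append.mp hx with h2 | h2
      · exact List.mem_takeWhile_imp h2
      · exact h1 x h2
    by_contra hne
    have hd : List.dropWhile PySem.Chars.isspace s.reverse ≠ [] := by
      intro h0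
      exact hne (by simp [PySem.Chars.rstrip, h0])
    have hc := List.head_dropWhile_not PySem.Chars.isspace hd
    have hmem : (List.dropWhile PySem.Chars.isspace s.reverse).head hd ∈ PySem.Chars.rstrip s := by
      simp only [PySem.Chars.rstrip, List.mem_reverse]
      exact List.head_mem hd
    have := hall _ hmem
    rw [hc] at this
    exact Bool.false_ne_true this
  · intro h; rw [h]; rfl

theorem bLoop_cons (l : List Char) (rest : List (List Char)) :
    bLoop (l :: rest) = if l = [] then [] :: bLoop (skipBlanks rest) else l :: bLoop rest := by
  rw [bLoop]

-- the single loop-equivalence invariant: with a zero counter A's loop produces B's run-grouped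
-- output; with a positive counter it produces B's output for the remainder of the blank run skipped
theorem loop_eq (lines : List (List Char)) :
    ∀ (acc : List (List Char)) (blank : Nat),
    (∀ l ∈ lines, (PySem.Chars.strip l = [] ↔ l = [])) →
    aLoop lines acc blank =
      acc ++ (if blank = 0 then bLoop lines else bLoop (skipBlanks lines)) := by
  induction lines with
  | nil => intro acc blank _; simp [aLoop, bLoop, skipBlanks]
  | cons l rest ih =>
    intro acc blank H
    have Hl := H l (List.mem_cons_self ..)
    have Hrest : ∀ x ∈ rest, (PySem.Chars.strip x = [] ↔ x = []) :=
      fun x hx => H x (List.mem_cons_of_mem _ hx)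
    by_cases hb : PySem.Chars.strip l = []
    · have hl0 : l = [] := Hl.mp hb
      subst hl0
      simp only [aLoop, if_pos hb]
      rw [ih _ _ Hrest]
      rcases Nat.eq_zero_or_pos blank with h0 | h0
      · subst h0
        simp [bLoop]
      · have : ¬ (blank + 1 ≤ 1) := by omega
        simp only [if_neg this, if_neg (by omega : ¬ blank + 1 = 0), if_neg (by omega : ¬ blank = 0)]
        simp [skipBlanks]
    · have hl : l ≠ [] := fun e => hb (Hl.mpr e)
      simp only [aLoop, if_neg hb]
      rw [ih _ _ Hrest, if_pos rfl]
      split_ifs with h0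
      · rw [bLoop_cons, if_neg hl]
        simp
      · simp only [skipBlanks, if_neg hl]
        rw [bLoop_cons, if_neg hl]
        simp

-- ===== VERDICT (by name: the statement is the Claim_ definition above) =====
theorem optimize_markdown_content_spec : Claim_equal_optimize_markdown_content := by
  intro markdown _
  unfold Spec_optimize_markdown_content optimize_markdown_content optimize_markdown_content_alt
  have h := loop_eq
    ((PySem.Chars.splitOn (PySem.Str.replace (PySem.Str.replace markdown "\r\n" "\n") "\r" "\n").toList ['\n']).map PySem.Chars.rstrip)
    [] 0
    (by
      intro l hl
      obtain ⟨raw, _, rfl⟩ := List.mem_map.mp hl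
      exact ⟨fun h => (strip_rstrip_eq_nil_iff raw).mp h, fun h => by rw [h]; rfl⟩)
  dsimp only
  rw [h]
  simp
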